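-- pv_equiv track=rewrite | github.com/poyuaki/study_algorithm | dijkstra.py | get_cost_two_way
-- ===== SOURCE A (Python) =====
-- def get_cost (now_node, next_node):
--   """
--   始まりのノード(now_node)から、進むノード(next_node)へ進むときのコストを返す。
--   見つからない場合は-1を返す。
--   """
--   if now_node == "a":
--     if next_node == "b":
--       return 2
--     elif next_node == "c":
--       return 5
--     elif next_node == "d":
--       return 4
--   elif now_node == "b":
--     if next_node == "d":
--       return 3
--     elif next_node == "e":
--       return 6
--   elif now_node == "c":
--     if next_node == "d":
--       return 2
--     elif next_node == "f":
--       return 6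
--   elif now_node == "d":
--     if next_node == "e":
--       return 2
--   elif now_node == "e":
--     if next_node == "f":
--       return 4
--   return -1
--
-- def get_cost_two_way (now_node, next_node):
--   """
--   始まりのノード(now_node)から、次のノード(next_node)までのコストを双方向に取得する。もしも見つからなれけば-1を返す。
--   """
--   count = 0 # ループ変数
--   is_find = True # 見つかったかどうか
--   now_node_temp = now_node # 仮の変数に代入
--   next_node_temp = next_node
--   cost = 0 # コスト
--   while count <= 1:
--     cost = get_cost(now_node_temp, next_node_temp) # コストの取得
--     if cost == -1: # もしも見つからなければ
--       now_node_temp = next_node # 入れ替える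
--       next_node_temp = now_node
--       is_find = False
--     else:
--       is_find = True
--       break
--     count += 1
--   if is_find:
--     return cost
--   else:
--     return -1
-- ===== SOURCE B (Python) =====
-- # Symmetric adjacency matrix indexed by node letter (a=0 .. f=5); symmetry of the
-- # two-way lookup is baked into the matrix, so no forward/reverse retry is needed.
-- _MATRIX = [
--     [-1,  2,  5,  4, -1, -1],
--     [ 2, -1, -1,  3,  6, -1],
--     [ 5, -1, -1,  2, -1,  6],
--     [ 4,  3,  2, -1,  2, -1],
--     [-1,  6, -1,  2, -1,  4],
--     [-1, -1,  6, -1,  4, -1],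
-- ]
--
-- def get_cost_two_way(now_node, next_node):
--     if len(now_node) == 1 and len(next_node) == 1:
--         i = ord(now_node) - ord("a")
--         j = ord(next_node) - ord("a")
--         if 0 <= i < 6 and 0 <= j < 6:
--             return _MATRIX[i][j]
--     return -1
-- ===== Notes on version B (the rewrite author's own statement) =====
-- stated objective: alternative
-- what changed: Replaces the directed if/elif cost table plus the swap-and-retry while loop (count/is_find/temp state) by a symmetric 6x6 adjacency matrix indexed by character code, so one guarded matrix read replaces the two-direction probe entirely.
import Mathlib
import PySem

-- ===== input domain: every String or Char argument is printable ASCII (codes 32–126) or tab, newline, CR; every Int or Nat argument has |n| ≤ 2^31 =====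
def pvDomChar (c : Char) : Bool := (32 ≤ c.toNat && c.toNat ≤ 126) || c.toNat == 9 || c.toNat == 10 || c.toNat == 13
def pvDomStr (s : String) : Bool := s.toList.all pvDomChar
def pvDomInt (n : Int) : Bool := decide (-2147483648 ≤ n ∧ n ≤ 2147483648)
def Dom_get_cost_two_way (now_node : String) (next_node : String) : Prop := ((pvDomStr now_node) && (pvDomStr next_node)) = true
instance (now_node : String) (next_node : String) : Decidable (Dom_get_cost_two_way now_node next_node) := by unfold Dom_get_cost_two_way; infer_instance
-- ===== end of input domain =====

-- B replaces A's directed branch-tree cost table and its swap-and-retry while loop by a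
-- symmetric adjacency matrix indexed by character code (objective: simpler).

-- ===== PORT A =====
def get_cost (now_node : String) (next_node : String) : Int :=
  if now_node = "a" then
    if next_node = "b" then 2
    else if next_node = "c" then 5
    else if next_node = "d" then 4
    else -1
  else if now_node = "b" then
    if next_node = "d" then 3
    else if next_node = "e" then 6
    else -1
  else if now_node = "c" then
    if next_node = "d" then 2
    else if next_node = "f" then 6
    else -1
  else if now_node = "d" then
    if next_node = "e" then 2
    else -1
  else if now_node = "e" then
    if next_node = "f" then 4
    else -1
  else -1

-- the while loop: fuel = remaining iterations (count runs 0,1); state = the temp nodes,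
-- is_find and cost, exactly as in A
def gctw_loop : Nat → String → String → String → String → Bool → Int → Int
  | 0, _, _, _, _, is_find, cost => if is_find then cost else -1
  | fuel+1, now_node, next_node, now_t, next_t, _, _ =>
    let cost := get_cost now_t next_t
    if cost = -1 then
      gctw_loop fuel now_node next_node next_node now_node false cost
    else
      cost  -- is_find := true; break; then `if is_find: return cost`

def get_cost_two_way (now_node : String) (next_node : String) : Int :=
  gctw_loop 2 now_node next_node now_node next_node true 0

-- ===== PORT B =====
-- _MATRIX from Source B: symmetric 6×6 adjacency matrix, row/column = letter index a=0..f=5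
def costMatrix : List (List Int) :=
  [[-1,  2,  5,  4, -1, -1],
   [ 2, -1, -1,  3,  6, -1],
   [ 5, -1, -1,  2, -1,  6],
   [ 4,  3,  2, -1,  2, -1],
   [-1,  6, -1,  2, -1,  4],
   [-1, -1,  6, -1,  4, -1]]

-- len(s) == 1 ↔ s.toList matches [c]; ord(single-char s) = c.toNat (exact on ASCII);
-- _MATRIX[i][j] with both indices guarded in range 0..5 is PySem.List.pyGetD (exact there)
def get_cost_two_way_alt (now_node : String) (next_node : String) : Int :=
  match now_node.toList, next_node.toList with
  | [c], [d] =>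
    let i : Int := (c.toNat : Int) - 97
    let j : Int := (d.toNat : Int) - 97
    if 0 ≤ i ∧ i < 6 ∧ 0 ≤ j ∧ j < 6 then
      PySem.List.pyGetD (PySem.List.pyGetD costMatrix i []) j (-1)
    else -1
  | _, _ => -1

-- ===== PRECONDITION & SPEC =====
def Spec_get_cost_two_way (now_node : String) (next_node : String) (out : Int) : Prop := out = get_cost_two_way_alt now_node next_node
instance (now_node : String) (next_node : String) (out : Int) : Decidable (Spec_get_cost_two_way now_node next_node out) := by unfold Spec_get_cost_two_way; infer_instance

-- ===== CLAIM (what is proved, stated in full; the proofs are below) =====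
def Claim_equal_get_cost_two_way : Prop := ∀ (now_node : String) (next_node : String), Dom_get_cost_two_way now_node next_node → Spec_get_cost_two_way now_node next_node (get_cost_two_way now_node next_node)

-- ===== LEMMAS AND PROOFS =====

lemma char_eq_iff (c d : Char) : c = d ↔ c.toNat = d.toNat :=
  ⟨fun h => h ▸ rfl, fun h => Char.ext (UInt32.toNat_inj.mp h)⟩

lemma str_eq_iff (s t : String) : s = t ↔ s.toList = t.toList :=
  ⟨fun h => h ▸ rfl, String.toList_inj.mp⟩

-- A's directed table only fires on single-letter strings
lemma gc_default (n x : String) (h : n.toList.length ≠ 1 ∨ x.toList.length ≠ 1) :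
    get_cost n x = -1 := by
  unfold get_cost
  split_ifs <;> first | rfl | (exfalso; rcases h with h | h <;> simp_all)

-- A's function as the forward-then-reverse probe of get_cost
lemma gctw_eq (n x : String) :
    get_cost_two_way n x =
      if get_cost n x = -1 then
        (if get_cost x n = -1 then (-1 : Int) else get_cost x n)
      else get_cost n x := by
  simp only [get_cost_two_way, gctw_loop]
  split_ifs <;> simp_all

-- ===== VERDICT (by name: the statement is the Claim_ definition above) =====
theorem get_cost_two_way_spec : Claim_equal_get_cost_two_way := by
  intro now next _
  unfold Spec_get_cost_two_way
  rw [gctw_eq]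
  unfold get_cost_two_way_alt
  rcases hn : now.toList with _ | ⟨c, _ | ⟨c2, cs⟩⟩
  · rw [gc_default now next (Or.inl (by rw [hn]; simp)),
        gc_default next now (Or.inr (by rw [hn]; simp))]
    simp
  case cons.cons =>
    rw [gc_default now next (Or.inl (by rw [hn]; simp)),
        gc_default next now (Or.inr (by rw [hn]; simp))]
    simp
  rcases hx : next.toList with _ | ⟨d, _ | ⟨d2, ds⟩⟩
  · rw [gc_default now next (Or.inr (by rw [hx]; simp)),
        gc_default next now (Or.inl (by rw [hx]; simp))]
    simp
  case cons.cons =>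
    rw [gc_default now next (Or.inr (by rw [hx]; simp)),
        gc_default next now (Or.inl (by rw [hx]; simp))]
    simp
  -- both single characters
  unfold get_cost
  simp only [str_eq_iff, hn, hx]
  simp only [show ("a":String).toList = ['a'] from rfl, show ("b":String).toList = ['b'] from rfl,
    show ("c":String).toList = ['c'] from rfl, show ("d":String).toList = ['d'] from rfl,
    show ("e":String).toList = ['e'] from rfl, show ("f":String).toList = ['f'] from rfl,
    List.cons.injEq, and_true, char_eq_iff]
  by_cases hcr : 97 ≤ c.toNat ∧ c.toNat < 103
  · by_cases hdr : 97 ≤ d.toNat ∧ d.toNat < 103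
    · obtain ⟨hc1, hc2⟩ := hcr; obtain ⟨hd1, hd2⟩ := hdr
      interval_cases h1 : c.toNat <;> interval_cases h2 : d.toNat <;> decide
    · have h97 : d.toNat ≠ 97 := by omega
      have h98 : d.toNat ≠ 98 := by omega
      have h99 : d.toNat ≠ 99 := by omega
      have h100 : d.toNat ≠ 100 := by omega
      have h101 : d.toNat ≠ 101 := by omega
      have h102 : d.toNat ≠ 102 := by omega
      simp only [show ('a':Char).toNat = 97 from rfl, show ('b':Char).toNat = 98 from rfl,
        show ('c':Char).toNat = 99 from rfl, show ('d':Char).toNat = 100 from rfl,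
        show ('e':Char).toNat = 101 from rfl, show ('f':Char).toNat = 102 from rfl]
      simp [h97, h98, h99, h100, h101, h102]; (intros; omega)
  · have h97 : c.toNat ≠ 97 := by omega
    have h98 : c.toNat ≠ 98 := by omega
    have h99 : c.toNat ≠ 99 := by omega
    have h100 : c.toNat ≠ 100 := by omega
    have h101 : c.toNat ≠ 101 := by omega
    have h102 : c.toNat ≠ 102 := by omega
    simp only [show ('a':Char).toNat = 97 from rfl, show ('b':Char).toNat = 98 from rfl,
      show ('c':Char).toNat = 99 from rfl, show ('d':Char).toNat = 100 from rfl,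
      show ('e':Char).toNat = 101 from rfl, show ('f':Char).toNat = 102 from rfl]
    simp [h97, h98, h99, h100, h101, h102]; (intros; omega)
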